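-- pv_equiv track=rewrite | github.com/Xinglab/isoCirc | isoCirc_pipeline/isocirc/parse_gff.py | is_known_exon
-- ===== SOURCE A (Python) =====
-- def is_known_exon(exon, is_left, is_right, anno_exon, site_dis, end_dis):
--     S_left = end_dis if is_left else site_dis
--     S_right = end_dis if is_right else site_dis
--     S_left_range, S_right_range = [0], [0]
--     for i in range(1, S_left + 1):
--         S_left_range.append(i)
--         S_left_range.append(-i)
--     for i in range(1, S_right + 1):
--         S_right_range.append(i)
--         S_right_range.append(-i)
--     for sl in S_left_range:
--         for sr in S_right_range:
--             if (exon[0], True, exon[2] + sl, exon[3] + sr) in anno_exon or \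
--                     (exon[0], False, exon[2] + sl, exon[3] + sr) in anno_exon:
--                 return True
--     return False
-- ===== SOURCE B (Python) =====
-- def is_known_exon(exon, is_left, is_right, anno_exon, site_dis, end_dis):
--     # scan the annotation once, range-checking distances (a negative tolerance means zero tolerance)
--     S_left = max(end_dis if is_left else site_dis, 0)
--     S_right = max(end_dis if is_right else site_dis, 0)
--     for c, _orient, s, e in anno_exon:
--         if c == exon[0] and abs(s - exon[2]) <= S_left and abs(e - exon[3]) <= S_right:
--             return True
--     return False
-- ===== Notes on version B (the rewrite author's own statement) =====
-- stated objective: faster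
-- what changed: Instead of materialising the +/- shift ranges and probing every shifted coordinate pair (twice, for both orientations) against the list, B scans anno_exon once and range-checks chromosome equality and the two absolute distances against the tolerances.
import Mathlib
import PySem

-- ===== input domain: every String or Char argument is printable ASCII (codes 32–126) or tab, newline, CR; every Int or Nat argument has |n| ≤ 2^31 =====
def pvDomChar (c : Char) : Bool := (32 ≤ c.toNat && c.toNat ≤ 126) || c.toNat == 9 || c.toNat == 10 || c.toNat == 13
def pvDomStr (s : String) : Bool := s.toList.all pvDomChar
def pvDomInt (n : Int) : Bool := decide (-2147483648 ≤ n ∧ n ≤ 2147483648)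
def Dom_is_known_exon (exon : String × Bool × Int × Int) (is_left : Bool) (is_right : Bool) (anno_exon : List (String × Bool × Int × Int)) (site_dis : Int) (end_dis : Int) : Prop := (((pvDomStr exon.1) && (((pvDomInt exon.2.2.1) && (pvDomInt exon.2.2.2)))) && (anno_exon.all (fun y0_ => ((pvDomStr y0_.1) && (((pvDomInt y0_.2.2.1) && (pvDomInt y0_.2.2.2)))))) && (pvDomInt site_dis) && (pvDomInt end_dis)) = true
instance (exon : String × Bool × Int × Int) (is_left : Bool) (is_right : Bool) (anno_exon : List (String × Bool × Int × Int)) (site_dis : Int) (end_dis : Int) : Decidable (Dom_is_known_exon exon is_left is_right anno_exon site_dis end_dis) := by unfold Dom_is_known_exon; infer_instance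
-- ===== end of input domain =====

-- B replaces A's enumeration of all shifted coordinate pairs (probed against the annotation list)
-- by a single scan of the annotation that range-checks the two distances; measured faster.

-- ===== PORT A =====
-- S_left_range / S_right_range built exactly as A does: [0] then append i, -i for i in range(1, S+1)
def pvShiftRange (S : Int) : List Int :=
  (PySem.List.pyRange 1 (S + 1) 1).foldl (fun acc i => (acc ++ [i]) ++ [-i]) [0]

def is_known_exon (exon : String × Bool × Int × Int) (is_left : Bool) (is_right : Bool) (anno_exon : List (String × Bool × Int × Int)) (site_dis : Int) (end_dis : Int) : Bool :=
  let S_left : Int := if is_left then end_dis else site_dis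
  let S_right : Int := if is_right then end_dis else site_dis
  let S_left_range := pvShiftRange S_left
  let S_right_range := pvShiftRange S_right
  S_left_range.any (fun sl => S_right_range.any (fun sr =>
    anno_exon.contains (exon.1, true, exon.2.2.1 + sl, exon.2.2.2 + sr) ||
    anno_exon.contains (exon.1, false, exon.2.2.1 + sl, exon.2.2.2 + sr)))

-- ===== PORT B =====
def is_known_exon_alt (exon : String × Bool × Int × Int) (is_left : Bool) (is_right : Bool) (anno_exon : List (String × Bool × Int × Int)) (site_dis : Int) (end_dis : Int) : Bool :=
  let S_left : Int := max (if is_left then end_dis else site_dis) 0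
  let S_right : Int := max (if is_right then end_dis else site_dis) 0
  anno_exon.any (fun t =>
    t.1 == exon.1 && decide (|t.2.2.1 - exon.2.2.1| ≤ S_left) && decide (|t.2.2.2 - exon.2.2.2| ≤ S_right))

-- ===== PRECONDITION & SPEC =====
def Spec_is_known_exon (exon : String × Bool × Int × Int) (is_left : Bool) (is_right : Bool) (anno_exon : List (String × Bool × Int × Int)) (site_dis : Int) (end_dis : Int) (out : Bool) : Prop := out = is_known_exon_alt exon is_left is_right anno_exon site_dis end_dis
instance (exon : String × Bool × Int × Int) (is_left : Bool) (is_right : Bool) (anno_exon : List (String × Bool × Int × Int)) (site_dis : Int) (end_dis : Int) (out : Bool) : Decidable (Spec_is_known_exon exon is_left is_right anno_exon site_dis end_dis out) := by unfold Spec_is_known_exon; infer_instance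

-- ===== CLAIM (what is proved, stated in full; the proofs are below) =====
def Claim_equal_is_known_exon : Prop := ∀ (exon : String × Bool × Int × Int) (is_left : Bool) (is_right : Bool) (anno_exon : List (String × Bool × Int × Int)) (site_dis : Int) (end_dis : Int), Dom_is_known_exon exon is_left is_right anno_exon site_dis end_dis → Spec_is_known_exon exon is_left is_right anno_exon site_dis end_dis (is_known_exon exon is_left is_right anno_exon site_dis end_dis)

-- ===== LEMMAS AND PROOFS =====
theorem foldl_pairs (l init : List Int) :
    l.foldl (fun acc i => (acc ++ [i]) ++ [-i]) init = init ++ l.flatMap (fun i => [i, -i]) := by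
  induction l generalizing init with
  | nil => simp
  | cons a t ih => simp [List.foldl, ih, List.flatMap]

theorem mem_pvShiftRange (x S : Int) : x ∈ pvShiftRange S ↔ |x| ≤ max S 0 := by
  simp only [pvShiftRange, foldl_pairs, List.mem_append, List.mem_flatMap,
    PySem.List.mem_pyRange_one, List.mem_cons, List.mem_singleton, List.not_mem_nil, or_false]
  constructor
  · rintro (rfl | ⟨i, ⟨hi1, hi2⟩, (rfl | rfl)⟩)
    · simp
    · rw [abs_of_nonneg (by omega)]; omega
    · rw [abs_neg, abs_of_nonneg (by omega)]; omega
  · intro h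
    rcases abs_cases x with ⟨h1, h2⟩ | ⟨h1, h2⟩ <;> by_cases hx : x = 0
    · exact Or.inl hx
    · exact Or.inr ⟨x, ⟨by omega, by omega⟩, Or.inl rfl⟩
    · exact Or.inl hx
    · exact Or.inr ⟨-x, ⟨by omega, by omega⟩, Or.inr (by ring)⟩

theorem is_known_exon_eq_alt (exon : String × Bool × Int × Int) (is_left : Bool) (is_right : Bool) (anno_exon : List (String × Bool × Int × Int)) (site_dis : Int) (end_dis : Int) :
    is_known_exon exon is_left is_right anno_exon site_dis end_dis
      = is_known_exon_alt exon is_left is_right anno_exon site_dis end_dis := by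
  apply Bool.eq_iff_iff.mpr
  simp only [is_known_exon, is_known_exon_alt, List.any_eq_true, List.contains_iff_mem,
    Bool.or_eq_true, Bool.and_eq_true, beq_iff_eq, decide_eq_true_eq, mem_pvShiftRange]
  constructor
  · rintro ⟨sl, hsl, sr, hsr, h | h⟩ <;>
    · refine ⟨_, h, ⟨rfl, by simpa using hsl⟩, by simpa using hsr⟩
  · rintro ⟨⟨c, o, s, e⟩, ht, ⟨hc, hs⟩, he⟩
    simp only at hc hs he
    subst hc
    refine ⟨s - exon.2.2.1, by simpa using hs, e - exon.2.2.2, by simpa using he, ?_⟩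
    have hs' : exon.2.2.1 + (s - exon.2.2.1) = s := by ring
    have he' : exon.2.2.2 + (e - exon.2.2.2) = e := by ring
    rw [hs', he']
    cases o
    · exact Or.inr ht
    · exact Or.inl ht

-- ===== VERDICT (by name: the statement is the Claim_ definition above) =====
theorem is_known_exon_spec : Claim_equal_is_known_exon := by
  intro exon is_left is_right anno_exon site_dis end_dis _
  exact is_known_exon_eq_alt exon is_left is_right anno_exon site_dis end_dis
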